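-- pv_equiv track=rewrite | github.com/esraamosallam/python-taskss | longest substring.py | alphaFunc
-- ===== SOURCE A (Python) =====
-- def alphaFunc(string:str):
--     longstring =string[0]
--     genstring =string[0]
--     for i in string[1:] :
--         if i > genstring[-1]:
--             genstring += i
--             if len(genstring)>len(longstring):
--                 longstring=genstring
--         else:
--             genstring = i
--     return longstring
-- ===== SOURCE B (Python) =====
-- def alphaFunc(string: str):
--     n = len(string)
--     e = [1] * n                     # e[i] = length of increasing run ending at i
--     for i in range(1, n):
--         if string[i] > string[i - 1]:
--             e[i] = e[i - 1] + 1
--     m = max(e)                      # length of the longest run (ValueError on "" like A's IndexError)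
--     k = e.index(m)                  # end index of the first longest run
--     return string[k - m + 1:k + 1]
-- ===== Notes on version B (the rewrite author's own statement) =====
-- stated objective: alternative
-- what changed: B replaces A's online scan that builds candidate strings and keeps the best by staged passes over a numeric DP table: it fills e[i] = length of the increasing run ending at i, then takes m = max(e) and k = e.index(m) and returns the slice string[k-m+1:k+1]; no substring is ever built during the scan.
import Mathlib
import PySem

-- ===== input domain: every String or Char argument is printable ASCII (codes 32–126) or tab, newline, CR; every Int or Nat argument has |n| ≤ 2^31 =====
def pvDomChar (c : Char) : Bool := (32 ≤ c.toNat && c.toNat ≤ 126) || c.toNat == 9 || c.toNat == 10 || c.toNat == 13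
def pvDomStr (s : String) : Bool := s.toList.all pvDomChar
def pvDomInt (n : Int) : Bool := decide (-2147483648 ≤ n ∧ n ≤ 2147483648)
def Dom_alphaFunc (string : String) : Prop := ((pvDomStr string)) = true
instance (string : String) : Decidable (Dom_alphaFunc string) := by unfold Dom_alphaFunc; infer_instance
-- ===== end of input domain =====

-- B replaces A's online best-substring tracking by staged passes over a numeric DP table
-- (run lengths ending at each index, then max / index / one slice); objective: alternative.

-- ===== PORT A =====
-- one loop step of A: state (longstring, genstring) over the chars of string[1:]
def alphaFuncStep (st : List Char × List Char) (i : Char) : List Char × List Char :=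
  match PySem.List.pyGet? st.2 (-1) with   -- genstring[-1]
  | none => st                              -- unreachable: genstring is never empty
  | some last =>
    if last < i then                        -- i > genstring[-1]
      let gen := st.2 ++ [i]                -- genstring += i
      (if st.1.length < gen.length then gen else st.1, gen)
    else (st.1, [i])                        -- genstring = i

def alphaFunc (string : String) : String :=
  match string.toList with
  | [] => ""                                -- string[0] raises IndexError; excluded by Pre_
  | c :: rest =>                            -- longstring = genstring = string[0]; loop over string[1:]
    String.mk (rest.foldl alphaFuncStep ([c], [c])).1

-- ===== PORT B =====
-- one step of B's table-filling loop, at index i ∈ range(1, n) (always in range, so the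
-- total pyGetD/pySetD forms are exact here): if string[i] > string[i-1] then e[i] = e[i-1] + 1
def alphaFuncAltStep (l : List Char) (e : List Int) (i : Int) : List Int :=
  if PySem.List.pyGetD l (i - 1) ' ' < PySem.List.pyGetD l i ' ' then
    PySem.List.pySetD e i (PySem.List.pyGetD e (i - 1) 0 + 1)
  else e

def alphaFunc_alt (string : String) : String :=
  let l := string.toList
  let n := l.length
  -- e = [1] * n
  let e := (PySem.List.pyRange 1 (n : Int) 1).foldl (alphaFuncAltStep l) (List.replicate n (1 : Int))
  match PySem.List.max? e (fun x => x) with -- m = max(e); raises ValueError on "" (excluded by Pre_)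
  | none => ""
  | some m =>
    match PySem.List.index? e m with        -- k = e.index(m)
    | none => ""                            -- unreachable: m ∈ e
    | some k =>                             -- return string[k - m + 1 : k + 1]
      String.mk (PySem.List.slice l (some ((k : Int) - m + 1)) (some ((k : Int) + 1)))

-- ===== PRECONDITION & SPEC =====
-- Pre_ excludes only the empty string, on which A raises IndexError at string[0].
def Pre_alphaFunc (string : String) : Prop := string ≠ ""
instance (string : String) : Decidable (Pre_alphaFunc string) := by unfold Pre_alphaFunc; infer_instance
def pvWitness_alphaFunc : String := "abc"

def Spec_alphaFunc (string : String) (out : String) : Prop := out = alphaFunc_alt string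
instance (string : String) (out : String) : Decidable (Spec_alphaFunc string out) := by unfold Spec_alphaFunc; infer_instance

-- ===== CLAIM (what is proved, stated in full; the proofs are below) =====
def Claim_equal_alphaFunc : Prop := ∀ (string : String), Dom_alphaFunc string → Pre_alphaFunc string → Spec_alphaFunc string (alphaFunc string)

-- ===== LEMMAS AND PROOFS =====

-- proof-only helper: the maximal strictly-increasing runs of the string, built left to right
def pvRunsStep (st : List (List Char) × List Char) (ch : Char) : List (List Char) × List Char :=
  match PySem.List.pyGet? st.2 (-1) with
  | none => st
  | some last =>
    if last < ch then (st.1, st.2 ++ [ch])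
    else (st.1 ++ [st.2], [ch])

-- proof-only helper: first length-maximal element (the foldl underlying A's running best)
def pvF (acc : Option (List Char)) (x : List Char) : Option (List Char) :=
  match acc with
  | none => some x
  | some m => if m.length < x.length then some x else some m

-- proof-only helper: [1, 2, …, n] as Ints
def pvRamp (n : Nat) : List Int := (List.range n).map (fun j : Nat => (j : Int) + 1)

-- proof-only helper: run lengths ending at each position, continuing a run of length q
-- whose last char is p
def pvEAux (p : Char) (q : Int) : List Char → List Int
  | [] => []
  | c :: t => (if p < c then q + 1 else 1) :: pvEAux c (if p < c then q + 1 else 1) t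

def pvE : List Char → List Int
  | [] => []
  | c :: t => 1 :: pvEAux c 1 t

lemma pv_get_neg_one {α : Type} (l : List α) (h : l ≠ []) :
    PySem.List.pyGet? l (-1) = some (l.getLast h) := by
  rw [PySem.List.pyGet?_neg_one, List.getLast?_eq_some_getLast h]

-- A's loop in terms of the runs loop: A's longstring is the first length-maximal element
-- of runs ++ [cur], and it is nonempty throughout
lemma pv_inv (rest : List Char) : ∀ (racc : List (List Char)) (cur L : List Char),
    cur ≠ [] → L ≠ [] → (racc ++ [cur]).foldl pvF none = some L →
    ((rest.foldl pvRunsStep (racc, cur)).1 ++ [(rest.foldl pvRunsStep (racc, cur)).2]).foldl pvF none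
        = some (rest.foldl alphaFuncStep (L, cur)).1
    ∧ (rest.foldl alphaFuncStep (L, cur)).1 ≠ [] := by
  induction rest with
  | nil => intro racc cur L hc hL hF; exact ⟨hF, hL⟩
  | cons i rest ih =>
    intro racc cur L hc hL hF
    rw [List.foldl_append] at hF
    simp only [List.foldl_cons]
    rw [alphaFuncStep, pvRunsStep, pv_get_neg_one cur hc]
    simp only []
    by_cases hlt : cur.getLast hc < i
    · rw [if_pos hlt, if_pos hlt]
      apply ih
      · simp
      · split <;> simp_all
      · rw [List.foldl_append]
        simp only [List.foldl_cons, List.foldl_nil] at hF ⊢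
        cases hb : (racc.foldl pvF none) with
        | none =>
          rw [hb] at hF
          simp [pvF] at hF ⊢
          subst hF
          simp
        | some m =>
          rw [hb] at hF
          simp only [pvF] at hF ⊢
          split at hF <;> rename_i hm <;> injection hF with hF <;> subst hF
          · simp at hm ⊢
            exact fun h2 => absurd h2 (by omega)
          · simp at hm ⊢
            split <;> rfl
    · rw [if_neg hlt, if_neg hlt]
      apply ih
      · simp
      · exact hL
      · rw [List.foldl_append]
        simp only [List.foldl_cons, List.foldl_nil] at hF ⊢
        rw [List.foldl_append]
        simp only [List.foldl_cons, List.foldl_nil]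
        rw [hF]
        simp only [pvF]
        rw [if_neg]
        simp
        intro h; exact hL (by simpa using h)

-- flatten invariant of the runs loop, plus nonemptiness of every run
lemma pv_runs_flat (rest : List Char) : ∀ (racc : List (List Char)) (cur : List Char),
    cur ≠ [] → (∀ r ∈ racc, r ≠ []) →
    ((rest.foldl pvRunsStep (racc, cur)).1).flatten ++ (rest.foldl pvRunsStep (racc, cur)).2
        = racc.flatten ++ cur ++ rest
    ∧ (rest.foldl pvRunsStep (racc, cur)).2 ≠ []
    ∧ (∀ r ∈ (rest.foldl pvRunsStep (racc, cur)).1, r ≠ []) := by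
  induction rest with
  | nil => intro racc cur hc hr; exact ⟨by simp, hc, hr⟩
  | cons ch rest ih =>
    intro racc cur hc hr
    simp only [List.foldl_cons]
    rw [pvRunsStep, pv_get_neg_one cur hc]
    simp only []
    by_cases hlt : cur.getLast hc < ch
    · rw [if_pos hlt]
      have := ih racc (cur ++ [ch]) (by simp) hr
      refine ⟨?_, this.2⟩
      rw [this.1]
      simp
    · rw [if_neg hlt]
      have := ih (racc ++ [cur]) [ch] (by simp) (by
        intro r hrm
        rcases List.mem_append.mp hrm with h | h
        · exact hr r h
        · rw [List.mem_singleton.mp h]; exact hc)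
      refine ⟨?_, this.2⟩
      rw [this.1]
      simp

-- the DP table is the concatenation of the ramps [1..len r] over the runs
lemma pv_mem_ramp (n : Nat) (x : Int) : x ∈ pvRamp n ↔ 1 ≤ x ∧ x ≤ n := by
  unfold pvRamp
  rw [List.mem_map]
  constructor
  · rintro ⟨i, hi, rfl⟩
    rw [List.mem_range] at hi
    omega
  · intro ⟨h1, h2⟩
    refine ⟨(x - 1).toNat, ?_, by omega⟩
    rw [List.mem_range]
    omega

lemma pv_ramp_length (n : Nat) : (pvRamp n).length = n := by simp [pvRamp]

lemma pv_ramp_succ (n : Nat) : pvRamp (n + 1) = pvRamp n ++ [((n : Int) + 1)] := by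
  simp [pvRamp, List.range_succ]

lemma pv_runs_ramp (rest : List Char) : ∀ (racc : List (List Char)) (cur : List Char) (hc : cur ≠ []),
    ((rest.foldl pvRunsStep (racc, cur)).1 ++ [(rest.foldl pvRunsStep (racc, cur)).2]).flatMap
        (fun r => pvRamp r.length)
      = (racc.flatMap (fun r => pvRamp r.length)) ++ pvRamp cur.length
          ++ pvEAux (cur.getLast hc) (cur.length : Int) rest := by
  induction rest with
  | nil => intro racc cur hc; simp [pvEAux]
  | cons c t ih =>
    intro racc cur hc
    simp only [List.foldl_cons]
    rw [pvRunsStep, pv_get_neg_one cur hc]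
    simp only []
    by_cases hlt : cur.getLast hc < c
    · rw [if_pos hlt]
      rw [ih racc (cur ++ [c]) (by simp)]
      rw [pvEAux, if_pos hlt]
      have hgl : (cur ++ [c]).getLast (by simp) = c := List.getLast_append_singleton ..
      rw [hgl]
      simp only [List.length_append, List.length_cons, List.length_nil, Nat.zero_add]
      rw [pv_ramp_succ]
      push_cast
      simp
    · rw [if_neg hlt]
      rw [ih (racc ++ [cur]) [c] (by simp)]
      rw [pvEAux, if_neg hlt]
      simp [pvRamp, List.range_succ]

lemma pv_eAux_length (t : List Char) : ∀ p q, (pvEAux p q t).length = t.length := by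
  induction t with
  | nil => intro p q; rfl
  | cons c t ih => intro p q; simp [pvEAux, ih]

lemma pv_E_length (l : List Char) : (pvE l).length = l.length := by
  cases l with
  | nil => rfl
  | cons c t => simp [pvE, pv_eAux_length]

-- pointwise recurrence of the DP table
lemma pv_eAux_get (t : List Char) : ∀ p q c (j : Nat) (h : j < t.length),
    (pvEAux p q (c :: t))[j + 1]'(by simp [pv_eAux_length]; omega)
      = if (c :: t)[j]'(by simp; omega) < t[j] then
          (pvEAux p q (c :: t))[j]'(by simp [pv_eAux_length]; omega) + 1 else 1 := by
  induction t with
  | nil => intro p q c j h; simp at h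
  | cons d t ih =>
    intro p q c j h
    match j with
    | 0 => simp [pvEAux]
    | Nat.succ j' =>
      have := ih c (if p < c then q + 1 else 1) d j' (by simpa using h)
      simp only [pvEAux, List.getElem_cons_succ] at this ⊢
      exact this

lemma pv_E_rec (l : List Char) (j : Nat) (h1 : 1 ≤ j) (h2 : j < l.length) :
    (pvE l)[j]'(by rw [pv_E_length]; omega)
      = if l[j - 1]'(by omega) < l[j] then (pvE l)[j - 1]'(by rw [pv_E_length]; omega) + 1 else 1 := by
  match l, j with
  | c :: t, 1 =>
    match t, h2 with
    | d :: t', _ => simp [pvE, pvEAux]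
  | c :: d :: t', Nat.succ (Nat.succ j') =>
    have := pv_eAux_get t' c 1 d j' (by simp at h2; omega)
    simp only [pvE, List.getElem_cons_succ] at this ⊢
    exact this

-- B's table-filling loop computes pvE
lemma pv_B_fold (l : List Char) (j : Nat) (h1 : 1 ≤ j) (h2 : j ≤ l.length) :
    (PySem.List.pyRange 1 (j : Int) 1).foldl (alphaFuncAltStep l) (List.replicate l.length (1 : Int))
      = (pvE l).take j ++ List.replicate (l.length - j) (1 : Int) := by
  induction j with
  | zero => omega
  | succ j ih =>
    by_cases hj : j = 0
    · subst hj
      rw [show ((1 : Nat) : Int) = 1 by norm_num, PySem.List.pyRange_one_eq_nil (le_refl 1)]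
      match l, h2 with
      | c :: t, _ =>
        simp [pvE, List.replicate_succ]
    · have h1' : 1 ≤ j := by omega
      have h2' : j ≤ l.length := by omega
      have ihj := ih h1' h2'
      have hcast : ((j + 1 : Nat) : Int) = (j : Int) + 1 := by push_cast; ring
      rw [hcast, PySem.List.pyRange_one_succ_right (by exact_mod_cast Nat.one_le_cast.mpr h1'),
          List.foldl_append, ihj]
      simp only [List.foldl_cons, List.foldl_nil]
      set E := pvE l with hE
      have hElen : E.length = l.length := pv_E_length l
      have hjl : j < l.length := by omega
      have hjm : ((j : Int) - 1) = ((j - 1 : Nat) : Int) := by omega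
      rw [alphaFuncAltStep, hjm]
      rw [PySem.List.pyGetD_natCast, PySem.List.pyGetD_natCast, PySem.List.pyGetD_natCast,
          PySem.List.pySetD_natCast]
      have hgl1 : l.getD (j - 1) ' ' = l[j - 1]'(by omega) := List.getD_eq_getElem l ' ' (by omega)
      have hgl2 : l.getD j ' ' = l[j]'hjl := List.getD_eq_getElem l ' ' hjl
      have htake : (E.take j).length = j := by rw [List.length_take]; omega
      have hge : (E.take j ++ List.replicate (l.length - j) (1 : Int)).getD (j - 1) 0
          = E[j - 1]'(by omega) := by
        rw [List.getD_eq_getElem _ 0 (by simp [htake]; omega)]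
        rw [List.getElem_append_left (by omega)]
        exact List.getElem_take
      have hset : (E.take j ++ List.replicate (l.length - j) (1 : Int)).set j
            (E[j - 1]'(by omega) + 1)
          = E.take j ++ (E[j - 1]'(by omega) + 1) :: List.replicate (l.length - (j + 1)) (1 : Int) := by
        rw [List.set_append, if_neg (by omega)]
        congr 1
        rw [htake, Nat.sub_self]
        have : l.length - j = (l.length - (j + 1)) + 1 := by omega
        rw [this, List.replicate_succ, List.set_cons_zero]
      have htake1 : E.take (j + 1) = E.take j ++ [E[j]'(by omega)] := by
        rw [List.take_add_one]
        congr 1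
        rw [List.getElem?_eq_getElem (by omega)]
        rfl
      rw [hgl1, hgl2, hge]
      have hrec := pv_E_rec l j h1' hjl
      by_cases hlt : l[j - 1]'(by omega) < l[j]'hjl
      · rw [if_pos hlt, hset, htake1]
        rw [hrec, if_pos hlt]
        simp [hE]
      · rw [if_neg hlt, htake1]
        rw [hrec, if_neg hlt]
        have : l.length - j = (l.length - (j + 1)) + 1 := by omega
        rw [this, List.replicate_succ]
        simp [hE]

-- decomposition produced by the first-length-maximal fold
lemma pv_pvF_decomp_aux (rs : List (List Char)) : ∀ (m F : List Char),
    rs.foldl pvF (some m) = some F →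
    (F = m ∧ ∀ r ∈ rs, r.length ≤ m.length) ∨
    ∃ pre suf, rs = pre ++ F :: suf ∧ m.length < F.length ∧
      (∀ r ∈ pre, r.length < F.length) ∧ (∀ r ∈ suf, r.length ≤ F.length) := by
  induction rs with
  | nil => intro m F h; left; exact ⟨by simpa using h.symm, by simp⟩
  | cons x rs ih =>
    intro m F h
    simp only [List.foldl_cons, pvF] at h
    by_cases hx : m.length < x.length
    · rw [if_pos hx] at h
      rcases ih x F h with ⟨rfl, hall⟩ | ⟨pre, suf, rfl, hmF, hpre, hsuf⟩
      · right
        exact ⟨[], rs, rfl, hx, by simp, hall⟩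
      · right
        refine ⟨x :: pre, suf, rfl, by omega, ?_, hsuf⟩
        intro r hr
        rcases List.mem_cons.mp hr with rfl | hr
        · omega
        · exact hpre r hr
    · rw [if_neg hx] at h
      rcases ih m F h with ⟨rfl, hall⟩ | ⟨pre, suf, rfl, hmF, hpre, hsuf⟩
      · left
        refine ⟨rfl, ?_⟩
        intro r hr
        rcases List.mem_cons.mp hr with rfl | hr
        · omega
        · exact hall r hr
      · right
        refine ⟨x :: pre, suf, rfl, hmF, ?_, hsuf⟩
        intro r hr
        rcases List.mem_cons.mp hr with rfl | hr
        · omega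
        · exact hpre r hr

lemma pv_pvF_decomp (r0 : List Char) (rs : List (List Char)) (F : List Char)
    (h : (r0 :: rs).foldl pvF none = some F) :
    ∃ pre suf, r0 :: rs = pre ++ F :: suf ∧
      (∀ r ∈ pre, r.length < F.length) ∧ (∀ r ∈ suf, r.length ≤ F.length) := by
  simp only [List.foldl_cons, pvF] at h
  rcases pv_pvF_decomp_aux rs r0 F h with ⟨rfl, hall⟩ | ⟨pre, suf, heq, hmF, hpre, hsuf⟩
  · exact ⟨[], rs, rfl, by simp, hall⟩
  · refine ⟨r0 :: pre, suf, by rw [heq]; rfl, ?_, hsuf⟩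
    intro r hr
    rcases List.mem_cons.mp hr with rfl | hr
    · omega
    · exact hpre r hr

lemma pv_foldl_max_mem {α : Type} [LinearOrder α] (t : List α) : ∀ x : α, t.foldl max x ∈ x :: t := by
  induction t with
  | nil => intro x; simp
  | cons y t ih => intro x
                   have := ih (max x y)
                   simp only [List.foldl_cons]
                   rcases List.mem_cons.mp this with h | h
                   · rw [h]; rcases max_choice x y with h2 | h2 <;> rw [h2] <;> simp
                   · exact List.mem_cons_of_mem _ (List.mem_cons_of_mem _ h)

lemma pv_max_eq (e : List Int) (v : Int) (hv : v ∈ e) (hall : ∀ x ∈ e, x ≤ v) :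
    PySem.List.max? e (fun x => x) = some v := by
  cases e with
  | nil => cases hv
  | cons x t =>
    rw [PySem.List.max?_id_cons]
    congr 1
    have hmem := pv_foldl_max_mem t x
    have hle := PySem.List.le_foldl_max t x
    apply le_antisymm
    · exact hall _ hmem
    · rcases List.mem_cons.mp hv with h | h
      · exact h ▸ hle.1
      · exact hle.2 _ h

-- membership and bounds for ramps
lemma pv_flatMap_ramp_length (rs : List (List Char)) :
    (rs.flatMap (fun r => pvRamp r.length)).length = rs.flatten.length := by
  rw [List.length_flatMap, List.length_flatten]
  congr 1
  simp [pv_ramp_length]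

-- ===== VERDICT (by name: the statement is the Claim_ definition above) =====
theorem alphaFunc_spec : Claim_equal_alphaFunc := by
  intro s _ hpre
  unfold Spec_alphaFunc alphaFunc alphaFunc_alt
  cases hs : s.toList with
  | nil => exact absurd (String.toList_eq_nil_iff.mp hs) hpre
  | cons c rest =>
    simp only []
    set l := c :: rest with hl
    set st := rest.foldl pvRunsStep ([], [c]) with hst
    -- A's value is the first length-maximal run
    have hA := pv_inv rest [] [c] [c] (by simp) (by simp) (by simp [pvF])
    set A1 := (rest.foldl alphaFuncStep ([c], [c])).1 with hA1
    -- the runs flatten back to l, and every run is nonempty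
    have hflat := pv_runs_flat rest [] [c] (by simp) (by simp)
    -- B's DP table is the concatenation of the ramps over the runs
    have hE : pvE l = (st.1 ++ [st.2]).flatMap (fun r => pvRamp r.length) := by
      rw [pv_runs_ramp rest [] [c] (by simp)]
      simp [hl, pvE, pvRamp]
    -- B's loop computes the DP table
    have hfold : (PySem.List.pyRange 1 (l.length : Int) 1).foldl (alphaFuncAltStep l)
        (List.replicate l.length (1 : Int)) = pvE l := by
      rw [pv_B_fold l l.length (by simp [hl]) (le_refl _)]
      rw [Nat.sub_self, List.replicate_zero, List.append_nil,
          List.take_of_length_le (by rw [pv_E_length])]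
    -- decompose the runs around the first longest one
    obtain ⟨r0, rs', hrs⟩ := List.exists_cons_of_ne_nil
      (show st.1 ++ [st.2] ≠ [] by simp)
    rw [hrs] at hA
    obtain ⟨pre, suf, hdec, hpreLt, hsufLe⟩ := pv_pvF_decomp r0 rs' A1 hA.1
    rw [← hrs] at hdec
    have hA1ne : A1 ≠ [] := hA.2
    set M := A1.length with hM
    have hM1 : 1 ≤ M := by
      rw [hM]; exact List.length_pos_of_ne_nil hA1ne
    -- the table, split at the first longest run's ramp
    set P := pre.flatMap (fun r => pvRamp r.length) with hP
    set S := suf.flatMap (fun r => pvRamp r.length) with hS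
    have hEsplit : pvE l = P ++ pvRamp M ++ S := by
      rw [hE, hdec]
      simp [hP, hS, hM, List.flatMap_append, List.append_assoc]
    -- every table entry is at most M
    have hbound : ∀ x ∈ pvE l, x ≤ (M : Int) := by
      intro x hx
      rw [hE, List.mem_flatMap] at hx
      obtain ⟨r, hr, hxr⟩ := hx
      have hrM : r.length ≤ M := by
        rw [hdec] at hr
        rcases List.mem_append.mp hr with h | h
        · exact le_of_lt (hpreLt r h)
        · rcases List.mem_cons.mp h with rfl | h
          · exact le_refl _
          · exact hsufLe r h
      have := (pv_mem_ramp r.length x).mp hxr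
      omega
    -- max(e) = M
    have hmax : PySem.List.max? (pvE l) (fun x => x) = some (M : Int) := by
      apply pv_max_eq
      · rw [hEsplit]
        have : (M : Int) ∈ pvRamp M := (pv_mem_ramp M (M : Int)).mpr ⟨by omega, le_refl _⟩
        simp [this]
      · exact hbound
    -- e.index(M) = |P| + (M - 1)
    have hidx : PySem.List.index? (pvE l) (M : Int) = some (P.length + (M - 1)) := by
      rw [PySem.List.index?_eq_some_iff]
      refine ⟨P ++ pvRamp (M - 1), S, ?_, ?_, ?_⟩
      · rw [hEsplit]
        have : pvRamp M = pvRamp (M - 1) ++ [(M : Int)] := by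
          have h2 : M = (M - 1) + 1 := by omega
          conv_lhs => rw [h2]
          rw [pv_ramp_succ]
          have h3 : ((M - 1 : Nat) : Int) + 1 = (M : Int) := by omega
          rw [h3]
        rw [this]
        simp [List.append_assoc]
      · rw [List.length_append, pv_ramp_length]
      · intro hmem
        rcases List.mem_append.mp hmem with h | h
        · rw [hP, List.mem_flatMap] at h
          obtain ⟨r, hr, hxr⟩ := h
          have := (pv_mem_ramp r.length (M : Int)).mp hxr
          have := hpreLt r hr
          omega
        · have := (pv_mem_ramp (M - 1) (M : Int)).mp h
          omega
    -- the slice picks out exactly the first longest run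
    rw [hfold, hmax]
    dsimp only
    rw [hidx]
    dsimp only
    have hPlen : P.length = pre.flatten.length := pv_flatMap_ramp_length pre
    have hlsplit : l = pre.flatten ++ (A1 ++ suf.flatten) := by
      have h1 : (st.1 ++ [st.2]).flatten = l := by
        rw [List.flatten_append]
        simpa using hflat.1
      rw [← h1, hdec]
      simp
    have hcast1 : ((P.length + (M - 1) : Nat) : Int) - (M : Int) + 1
        = ((pre.flatten.length : Nat) : Int) := by
      rw [hPlen] at *
      omega
    have hcast2 : ((P.length + (M - 1) : Nat) : Int) + 1
        = ((pre.flatten.length : Nat) : Int) + ((M : Nat) : Int) := by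
      rw [hPlen] at *
      omega
    rw [hcast1, hcast2, PySem.List.slice_natCast_add]
    rw [hlsplit, List.drop_left, List.take_left' (by rw [hM])]
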